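-- pv_equiv track=rewrite | github.com/yallerocha/University-Projects | Algorithms I/Diferença Entre Listas.py | diferenca_listas
-- ===== SOURCE A (Python) =====
-- def diferenca_listas(lista1, lista2):
--
--     if len(lista1) >= len(lista2):
--         num = len(lista1)
--     else:
--         num = len(lista2)
--
--     for x in range(num):
--         vav = 1
--         for i in range(len(lista2)):
--             for j in range(len(lista1)):
--                 if lista2[i] == lista1[j]:
--                     lista1.pop(j)
--                     vav = vav * -1
--                     break
--
--             if vav == -1: break
--
--     return lista1
-- ===== SOURCE B (Python) =====
-- def diferenca_listas(lista1, lista2):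
--     for y in lista2:
--         while y in lista1:
--             lista1.remove(y)
--     return lista1
-- ===== Notes on version B (the rewrite author's own statement) =====
-- stated objective: simpler
-- what changed: B drives the loop off lista2, repeatedly removing each of its values from lista1 in place, instead of A's triple-nested index scan repeated max(len1,len2) times.
import Mathlib
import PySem

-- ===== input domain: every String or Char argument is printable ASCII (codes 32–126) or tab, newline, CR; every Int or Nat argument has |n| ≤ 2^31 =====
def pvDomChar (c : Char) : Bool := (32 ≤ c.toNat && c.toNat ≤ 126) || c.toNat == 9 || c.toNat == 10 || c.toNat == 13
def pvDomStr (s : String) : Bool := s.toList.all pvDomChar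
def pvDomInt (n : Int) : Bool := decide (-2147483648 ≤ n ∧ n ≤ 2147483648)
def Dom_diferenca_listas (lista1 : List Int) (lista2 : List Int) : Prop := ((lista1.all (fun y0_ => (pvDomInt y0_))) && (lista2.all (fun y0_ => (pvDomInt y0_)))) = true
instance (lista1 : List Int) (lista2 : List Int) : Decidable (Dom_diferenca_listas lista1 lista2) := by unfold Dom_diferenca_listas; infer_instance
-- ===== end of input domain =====

-- B iterates over lista2 and repeatedly removes each of its values from lista1 in place,
-- replacing A's triple-nested index scan repeated max(len) times (objective: simpler).
-- Both Pythons mutate lista1 in place and return it; they perform the same net mutation.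

-- ===== PORT A =====
-- the j-loop of A: scan lista1 for the first j with lista2[i] == lista1[j]; pop it (none = no match)
def pvScanPop (l1 : List Int) (v : Int) : Option (List Int) :=
  match l1 with
  | [] => none
  | a :: rest => if v == a then some rest else (pvScanPop rest v).map (a :: ·)

-- the i-loop of A: try each element of lista2 in order; break after the first successful pop (vav == -1)
def pvLoopI (l2 : List Int) (l1 : List Int) : List Int :=
  match l2 with
  | [] => l1
  | v :: rest =>
    match pvScanPop l1 v with
    | some l1' => l1'
    | none => pvLoopI rest l1

def diferenca_listas (lista1 : List Int) (lista2 : List Int) : List Int :=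
  let num := if lista1.length ≥ lista2.length then lista1.length else lista2.length
  (List.range num).foldl (fun l1 _ => pvLoopI lista2 l1) lista1

-- ===== PORT B =====
-- lista1.remove(y): drop the first occurrence of y
def pvRemoveFirst (y : Int) : List Int → List Int
  | [] => []
  | a :: rest => if a == y then rest else a :: pvRemoveFirst y rest

theorem pvRemoveFirst_length_lt (y : Int) (l : List Int) (h : y ∈ l) :
    (pvRemoveFirst y l).length < l.length := by
  induction l with
  | nil => cases h
  | cons a rest ih =>
    by_cases hay : a = y
    · simp [pvRemoveFirst, hay]
    · have hm : y ∈ rest := by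
        rcases List.mem_cons.mp h with h' | h'
        · exact absurd h'.symm hay
        · exact h'
      simp only [pvRemoveFirst, beq_iff_eq, if_neg hay, List.length_cons]
      have := ih hm
      omega

-- the 'while y in lista1: lista1.remove(y)' loop of B
def pvWhileRemove (y : Int) (l1 : List Int) : List Int :=
  if _h : y ∈ l1 then pvWhileRemove y (pvRemoveFirst y l1) else l1
termination_by l1.length
decreasing_by exact pvRemoveFirst_length_lt y l1 _h

def diferenca_listas_alt (lista1 : List Int) (lista2 : List Int) : List Int :=
  lista2.foldl (fun l1 y => pvWhileRemove y l1) lista1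

-- ===== PRECONDITION & SPEC =====
def Spec_diferenca_listas (lista1 : List Int) (lista2 : List Int) (out : List Int) : Prop := out = diferenca_listas_alt lista1 lista2
instance (lista1 : List Int) (lista2 : List Int) (out : List Int) : Decidable (Spec_diferenca_listas lista1 lista2 out) := by unfold Spec_diferenca_listas; infer_instance

-- ===== CLAIM (what is proved, stated in full; the proofs are below) =====
def Claim_equal_diferenca_listas : Prop := ∀ (lista1 : List Int) (lista2 : List Int), Dom_diferenca_listas lista1 lista2 → Spec_diferenca_listas lista1 lista2 (diferenca_listas lista1 lista2)

-- ===== LEMMAS AND PROOFS =====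
-- Both sides compute lista1.filter (fun x => !l2.contains x).

theorem pvScanPop_spec (v : Int) (l1 : List Int) :
    pvScanPop l1 v = if v ∈ l1 then some (pvRemoveFirst v l1) else none := by
  induction l1 with
  | nil => simp [pvScanPop]
  | cons a rest ih =>
    by_cases hav : v = a
    · simp [pvScanPop, pvRemoveFirst, hav]
    · have hne : ¬ a = v := fun h => hav h.symm
      rw [pvScanPop, if_neg (by simpa using hav), ih]
      by_cases hv : v ∈ rest
      · simp [hv, hav, pvRemoveFirst, hne]
      · simp [hv, hav]

theorem pvRemoveFirst_filter_ne (y : Int) (l : List Int) (p : Int → Bool) (hp : p y = false) :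
    (pvRemoveFirst y l).filter p = l.filter p := by
  induction l with
  | nil => rfl
  | cons a rest ih =>
    by_cases hay : a = y
    · subst hay; simp [pvRemoveFirst, List.filter, hp]
    · simp only [pvRemoveFirst, beq_iff_eq, if_neg hay, List.filter]
      cases hpa : p a <;> simp [ih]

theorem pvRemoveFirst_countP (y : Int) (l : List Int) (p : Int → Bool) (hp : p y = true) (h : y ∈ l) :
    (l.filter p).length = ((pvRemoveFirst y l).filter p).length + 1 := by
  induction l with
  | nil => cases h
  | cons a rest ih =>
    by_cases hay : a = y
    · subst hay; simp [pvRemoveFirst, List.filter, hp]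
    · have hmem : y ∈ rest := by
        rcases List.mem_cons.mp h with h' | h'
        · exact absurd h'.symm hay
        · exact h'
      have h2 := ih hmem
      simp only [pvRemoveFirst, beq_iff_eq, if_neg hay]
      cases hpa : p a <;> simp [List.filter, hpa] <;> omega

-- loopI either leaves l1 unchanged (no element of l2 occurs) or removes the first occurrence
-- of the first element of l2 present in l1
theorem pvLoopI_cases (l2 l1 : List Int) :
    ((∀ v ∈ l2, v ∉ l1) ∧ pvLoopI l2 l1 = l1) ∨
    (∃ v, v ∈ l2 ∧ v ∈ l1 ∧ pvLoopI l2 l1 = pvRemoveFirst v l1) := by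
  induction l2 with
  | nil => left; simp [pvLoopI]
  | cons v rest ih =>
    by_cases hv : v ∈ l1
    · right; exact ⟨v, by simp, hv, by simp [pvLoopI, pvScanPop_spec, hv]⟩
    · have hstep : pvLoopI (v :: rest) l1 = pvLoopI rest l1 := by
        simp [pvLoopI, pvScanPop_spec, hv]
      rcases ih with ⟨hall, heq⟩ | ⟨w, hw2, hw1, heq⟩
      · left
        refine ⟨?_, by rw [hstep, heq]⟩
        intro u hu
        rcases List.mem_cons.mp hu with h' | h'
        · subst h'; exact hv
        · exact hall u h'
      · right; exact ⟨w, List.mem_cons_of_mem _ hw2, hw1, by rw [hstep, heq]⟩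

-- iterating loopI enough times yields the "not in l2" filter
theorem pvIter_spec (l2 : List Int) (n : Nat) (l1 : List Int)
    (h : (l1.filter (fun x => l2.contains x)).length ≤ n) :
    (fun l => pvLoopI l2 l)^[n] l1 = l1.filter (fun x => !l2.contains x) := by
  induction n generalizing l1 with
  | zero =>
    simp only [Function.iterate_zero, id]
    have h0 : l1.filter (fun x => l2.contains x) = [] :=
      List.eq_nil_of_length_eq_zero (Nat.le_zero.mp h)
    symm
    apply List.filter_eq_self.mpr
    intro x hx
    by_contra hc
    have hcx : l2.contains x = true := by
      revert hc; cases l2.contains x <;> simp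
    have hmem : x ∈ l1.filter (fun x => l2.contains x) := List.mem_filter.mpr ⟨hx, hcx⟩
    rw [h0] at hmem
    cases hmem
  | succ n ih =>
    rw [Function.iterate_succ_apply]
    rcases pvLoopI_cases l2 l1 with ⟨hall, heq⟩ | ⟨v, hv2, hv1, heq⟩
    · rw [heq]
      have hb : (l1.filter (fun x => l2.contains x)).length ≤ n := by
        have h0 : l1.filter (fun x => l2.contains x) = [] := by
          apply List.filter_eq_nil_iff.mpr
          intro x hx hcx
          exact hall x (by simpa using hcx) hx
        rw [h0]
        exact Nat.zero_le n
      exact ih l1 hb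
    · rw [heq]
      have hpv : (fun x => l2.contains x) v = true := by simp [hv2]
      have hcount := pvRemoveFirst_countP v l1 (fun x => l2.contains x) hpv hv1
      have hle : ((pvRemoveFirst v l1).filter (fun x => l2.contains x)).length ≤ n := by
        omega
      rw [ih _ hle]
      exact pvRemoveFirst_filter_ne v l1 (fun x => !l2.contains x) (by simp [hv2])

theorem pvFoldl_range_const {α : Type} (g : α → α) (n : Nat) (a : α) :
    (List.range n).foldl (fun x _ => g x) a = g^[n] a := by
  induction n generalizing a with
  | zero => simp
  | succ n ih => rw [List.range_succ, List.foldl_append, ih, Function.iterate_succ_apply']; rfl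

theorem pvWhileRemove_filter (y : Int) (l1 : List Int) :
    pvWhileRemove y l1 = l1.filter (fun x => !(x == y)) := by
  have key : ∀ n (l : List Int), l.length ≤ n →
      pvWhileRemove y l = l.filter (fun x => !(x == y)) := by
    intro n
    induction n with
    | zero =>
      intro l hl
      have : l = [] := List.eq_nil_of_length_eq_zero (Nat.le_zero.mp hl)
      subst this
      rw [pvWhileRemove]; simp
    | succ n ih =>
      intro l hl
      rw [pvWhileRemove]
      by_cases h : y ∈ l
      · rw [dif_pos h]
        have hlt := pvRemoveFirst_length_lt y l h
        rw [ih _ (by omega)]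
        exact pvRemoveFirst_filter_ne y l (fun x => !(x == y)) (by simp)
      · rw [dif_neg h]
        symm
        apply List.filter_eq_self.mpr
        intro x hx
        simp only [Bool.not_eq_eq_eq_not, Bool.not_true, beq_eq_false_iff_ne]
        intro hxy; exact h (hxy ▸ hx)
  exact key l1.length l1 le_rfl

theorem pvFoldB (l2 l1 : List Int) :
    l2.foldl (fun l y => pvWhileRemove y l) l1 = l1.filter (fun x => !l2.contains x) := by
  induction l2 generalizing l1 with
  | nil => simp
  | cons y rest ih =>
    rw [List.foldl_cons, ih, pvWhileRemove_filter, List.filter_filter]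
    apply List.filter_congr
    intro x _
    by_cases hxy : x = y <;> by_cases hxr : x ∈ rest <;> simp [hxy, hxr]

-- ===== VERDICT (by name: the statement is the Claim_ definition above) =====
theorem diferenca_listas_spec : Claim_equal_diferenca_listas := by
  intro lista1 lista2 _
  unfold Spec_diferenca_listas diferenca_listas diferenca_listas_alt
  have hnum : (lista1.filter (fun x => lista2.contains x)).length ≤
      (if lista1.length ≥ lista2.length then lista1.length else lista2.length) := by
    have h1 := List.length_filter_le (fun x => lista2.contains x) lista1
    split <;> omega
  rw [pvFoldl_range_const, pvIter_spec lista2 _ lista1 hnum, pvFoldB]
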